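-- pv_equiv track=rewrite | github.com/DevilCoders/Yandex | cloud/support/support-bot/core/workers/task_notifier.py | merge_changes
-- ===== SOURCE A (Python) =====
-- def merge_changes(changes):
--     ch_add = {}
--     ch_rm = {}
--     for change in changes:
--         if change.get('change') == 'add':
--             ch_add = {
--                 'change': 'add',
--                 'user': change.get('user'),
--                 'user_id': change.get('user_id'),
--                 'queue_name': change.get('queue_name') if not ch_add else f'{ch_add.get("queue_name")}, '
--                                                                           f'{change.get("queue_name")}',
--                 'queue_id': change.get('queue_id') if not ch_add else f'{ch_add.get("queue_id")},'
--                                                                       f'{change.get("queue_id")}',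
--                 'supervisor': change.get('supervisor') if not ch_add else f'{ch_add.get("supervisor")},'
--                                                                       f'{change.get("supervisor")}',
--             }
--
--         if change.get('change') == 'rm':
--             ch_rm = {
--                 'change': 'rm',
--                 'user': change.get('user'),
--                 'user_id': change.get('user_id'),
--                 'queue_name': change.get('queue_name') if not ch_rm else f'{ch_rm.get("queue_name")},'
--                                                                          f' {change.get("queue_name")}',
--                 'queue_id': change.get('queue_id') if not ch_rm else f'{ch_rm.get("queue_id")},'
--                                                                      f'{change.get("queue_id")}',
--             }
--     return [ch_add, ch_rm]
-- ===== SOURCE B (Python) =====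
-- def merge_changes(changes):
--     adds = [c for c in changes if c.get('change') == 'add']
--     rms = [c for c in changes if c.get('change') == 'rm']
--
--     def join(recs, field, sep):
--         if len(recs) == 1:
--             return recs[0].get(field)
--         return sep.join(str(r.get(field)) for r in recs)
--
--     def agg(recs, kind, with_supervisor):
--         if not recs:
--             return {}
--         last = recs[-1]
--         d = {
--             'change': kind,
--             'user': last.get('user'),
--             'user_id': last.get('user_id'),
--             'queue_name': join(recs, 'queue_name', ', '),
--             'queue_id': join(recs, 'queue_id', ','),
--         }
--         if with_supervisor:
--             d['supervisor'] = join(recs, 'supervisor', ',')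
--         return d
--
--     return [agg(adds, 'add', True), agg(rms, 'rm', False)]
-- ===== Notes on version B (the rewrite author's own statement) =====
-- stated objective: simpler
-- what changed: Replaces A's single fold that rebuilds ch_add/ch_rm dicts record by record (re-concatenating the accumulated join strings at every step) with a partition of changes into add/rm lists followed by one join per field (raw value kept when the list has exactly one record), with A's exact separators ', '/',' and str-coercion of None.
import Mathlib
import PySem

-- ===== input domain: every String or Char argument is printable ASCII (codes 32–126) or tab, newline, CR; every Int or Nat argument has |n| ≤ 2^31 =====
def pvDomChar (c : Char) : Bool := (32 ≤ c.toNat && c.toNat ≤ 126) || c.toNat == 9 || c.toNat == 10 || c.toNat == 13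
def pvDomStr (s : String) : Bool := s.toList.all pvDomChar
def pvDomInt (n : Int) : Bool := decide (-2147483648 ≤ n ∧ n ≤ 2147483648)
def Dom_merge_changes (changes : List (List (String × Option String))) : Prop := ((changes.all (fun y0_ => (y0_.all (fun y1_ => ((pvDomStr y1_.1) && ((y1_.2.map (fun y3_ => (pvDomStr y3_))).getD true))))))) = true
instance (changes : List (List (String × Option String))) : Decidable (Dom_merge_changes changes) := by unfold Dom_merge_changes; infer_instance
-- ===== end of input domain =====

-- B replaces A's fold that rebuilds the two dicts (re-joining strings) on every record by a
-- one-pass partition into add/rm lists followed by a single join per field (objective: simpler).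

-- shared helper: Python's change.get(k) on an association-list record (first match, None if absent)
def pget (r : List (String × Option String)) (k : String) : Option String :=
  (r.find? (fun p => p.1 == k)).bind Prod.snd

-- shared helper: str(v) inside an f-string / join, where v is a string or None
def ostr (o : Option String) : String := o.getD "None"

-- ===== PORT A =====
-- the 'add' branch: rebuild ch_add from the old ch_add and the current change
def aAddUpd (ca change : List (String × Option String)) : List (String × Option String) :=
  [("change", some "add"),
   ("user", pget change "user"),
   ("user_id", pget change "user_id"),
   ("queue_name", if ca.isEmpty then pget change "queue_name"
     else some (ostr (pget ca "queue_name") ++ ", " ++ ostr (pget change "queue_name"))),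
   ("queue_id", if ca.isEmpty then pget change "queue_id"
     else some (ostr (pget ca "queue_id") ++ "," ++ ostr (pget change "queue_id"))),
   ("supervisor", if ca.isEmpty then pget change "supervisor"
     else some (ostr (pget ca "supervisor") ++ "," ++ ostr (pget change "supervisor")))]

-- the 'rm' branch: rebuild ch_rm from the old ch_rm and the current change
def aRmUpd (cr change : List (String × Option String)) : List (String × Option String) :=
  [("change", some "rm"),
   ("user", pget change "user"),
   ("user_id", pget change "user_id"),
   ("queue_name", if cr.isEmpty then pget change "queue_name"
     else some (ostr (pget cr "queue_name") ++ ", " ++ ostr (pget change "queue_name"))),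
   ("queue_id", if cr.isEmpty then pget change "queue_id"
     else some (ostr (pget cr "queue_id") ++ "," ++ ostr (pget change "queue_id")))]

-- one iteration of A's for-loop over (ch_add, ch_rm)
def aStep (st : List (String × Option String) × List (String × Option String))
    (change : List (String × Option String)) :
    List (String × Option String) × List (String × Option String) :=
  let st1 := if pget change "change" == some "add" then (aAddUpd st.1 change, st.2) else st
  if pget change "change" == some "rm" then (st1.1, aRmUpd st1.2 change) else st1

def merge_changes (changes : List (List (String × Option String))) : List (List (String × Option String)) :=
  let st := changes.foldl aStep ([], [])
  [st.1, st.2]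

-- ===== PORT B =====
-- sep.join(str(r.get(field)) for r in recs), except a single record keeps its raw value
def bJoin (recs : List (List (String × Option String))) (field sep : String) : Option String :=
  if recs.length = 1 then pget (recs.headD []) field
  else some (PySem.Str.join sep (recs.map (fun r => ostr (pget r field))))

-- agg(recs, kind, with_supervisor)
def bAgg (recs : List (List (String × Option String))) (kind : String) (withSupervisor : Bool) :
    List (String × Option String) :=
  match recs.getLast? with
  | none => []
  | some last =>
    [("change", some kind),
     ("user", pget last "user"),
     ("user_id", pget last "user_id"),
     ("queue_name", bJoin recs "queue_name" ", "),
     ("queue_id", bJoin recs "queue_id" ",")] ++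
    (if withSupervisor then [("supervisor", bJoin recs "supervisor" ",")] else [])

def merge_changes_alt (changes : List (List (String × Option String))) : List (List (String × Option String)) :=
  let adds := changes.filter (fun c => pget c "change" == some "add")
  let rms := changes.filter (fun c => pget c "change" == some "rm")
  [bAgg adds "add" true, bAgg rms "rm" false]

-- ===== PRECONDITION & SPEC =====
def Spec_merge_changes (changes : List (List (String × Option String))) (out : List (List (String × Option String))) : Prop := out = merge_changes_alt changes
instance (changes : List (List (String × Option String))) (out : List (List (String × Option String))) : Decidable (Spec_merge_changes changes out) := by unfold Spec_merge_changes; infer_instance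

-- ===== CLAIM (what is proved, stated in full; the proofs are below) =====
def Claim_equal_merge_changes : Prop := ∀ (changes : List (List (String × Option String))), Dom_merge_changes changes → Spec_merge_changes changes (merge_changes changes)

-- ===== LEMMAS AND PROOFS =====

-- A's fold splits into one fold over the add-records and one over the rm-records
theorem foldl_aStep_split (l : List (List (String × Option String)))
    (ca cr : List (String × Option String)) :
    l.foldl aStep (ca, cr) =
      (((l.filter (fun c => pget c "change" == some "add")).foldl aAddUpd ca),
       ((l.filter (fun c => pget c "change" == some "rm")).foldl aRmUpd cr)) := by
  induction l generalizing ca cr with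
  | nil => rfl
  | cons c t ih =>
    simp only [List.foldl_cons, List.filter_cons]
    by_cases ha : (pget c "change" == some "add") = true
    · have hr : (pget c "change" == some "rm") = false := by
        simp only [beq_iff_eq] at ha ⊢; simp [ha]
      simp [aStep, ha, hr, ih]
    · by_cases hr : (pget c "change" == some "rm") = true
      · simp [aStep, ha, hr, ih]
      · simp [aStep, ha, hr, ih]

theorem chars_join_append_singleton (sep p : List Char) (xs : List (List Char)) (h : xs ≠ []) :
    PySem.Chars.join sep (xs ++ [p]) = PySem.Chars.join sep xs ++ sep ++ p := by
  induction xs with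
  | nil => exact absurd rfl h
  | cons q rest ih =>
    cases rest with
    | nil => simp [PySem.Chars.join_singleton, PySem.Chars.join_cons_cons]
    | cons q' rest' =>
      rw [show (q :: q' :: rest') ++ [p] = q :: q' :: (rest' ++ [p]) from rfl,
          PySem.Chars.join_cons_cons sep q q' (rest' ++ [p]),
          show q' :: (rest' ++ [p]) = (q' :: rest') ++ [p] from rfl,
          ih (by simp), PySem.Chars.join_cons_cons sep q q' rest']
      simp [List.append_assoc]

theorem str_join_append_singleton (sep p : String) (parts : List String) (h : parts ≠ []) :
    PySem.Str.join sep (parts ++ [p]) = PySem.Str.join sep parts ++ sep ++ p := by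
  apply String.toList_inj.mp
  simp only [PySem.Str.join, String.toList_append, String.toList_ofList, List.map_append,
    List.map_cons, List.map_nil]
  exact chars_join_append_singleton sep.toList p.toList (parts.map String.toList) (by simpa using h)

-- ostr of B's join is the plain string join, for any nonempty record list
theorem ostr_bJoin (recs : List (List (String × Option String))) (field sep : String)
    (h : recs ≠ []) :
    ostr (bJoin recs field sep) =
      PySem.Str.join sep (recs.map (fun r => ostr (pget r field))) := by
  cases recs with
  | nil => exact absurd rfl h
  | cons r t =>
    cases t with
    | nil => cases h : pget r field <;>
               simp [bJoin, PySem.Chars.join_singleton, PySem.Str.join, ostr, h]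
    | cons r' t' => simp [bJoin, ostr]

theorem bJoin_append (recs : List (List (String × Option String))) (r : List (String × Option String))
    (field sep : String) (h : recs ≠ []) :
    bJoin (recs ++ [r]) field sep = some (ostr (bJoin recs field sep) ++ sep ++ ostr (pget r field)) := by
  have hlen : (recs ++ [r]).length ≠ 1 := by
    cases recs with | nil => exact absurd rfl h | cons a t => simp
  rw [ostr_bJoin recs field sep h]
  simp only [bJoin, if_neg hlen, List.map_append, List.map_cons, List.map_nil]
  rw [str_join_append_singleton sep _ _ (by simpa using h)]

-- A's add-fold over exactly the add-records equals B's aggregation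
theorem foldl_aAddUpd_eq_bAgg (recs : List (List (String × Option String))) :
    recs.foldl aAddUpd [] = bAgg recs "add" true := by
  induction recs using List.reverseRecOn with
  | nil => rfl
  | append_singleton recs r ih =>
    by_cases hne : recs = []
    · subst hne; simp [aAddUpd, bAgg, bJoin, pget]
    · rw [List.foldl_append, List.foldl_cons, List.foldl_nil, ih]
      have hne' : recs ≠ [] := hne
      have hlast : recs.getLast? = some (recs.getLast hne') := List.getLast?_eq_some_getLast hne'
      simp only [bAgg, hlast, List.getLast?_concat]
      simp only [aAddUpd]
      rw [bJoin_append recs r "queue_name" ", " hne',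
          bJoin_append recs r "queue_id" "," hne',
          bJoin_append recs r "supervisor" "," hne']
      simp [pget]

-- A's rm-fold over exactly the rm-records equals B's aggregation
theorem foldl_aRmUpd_eq_bAgg (recs : List (List (String × Option String))) :
    recs.foldl aRmUpd [] = bAgg recs "rm" false := by
  induction recs using List.reverseRecOn with
  | nil => rfl
  | append_singleton recs r ih =>
    by_cases hne : recs = []
    · subst hne; simp [aRmUpd, bAgg, bJoin, pget]
    · rw [List.foldl_append, List.foldl_cons, List.foldl_nil, ih]
      have hne' : recs ≠ [] := hne
      have hlast : recs.getLast? = some (recs.getLast hne') := List.getLast?_eq_some_getLast hne'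
      simp only [bAgg, hlast, List.getLast?_concat]
      simp only [aRmUpd]
      rw [bJoin_append recs r "queue_name" ", " hne',
          bJoin_append recs r "queue_id" "," hne']
      simp [pget]

-- ===== VERDICT (by name: the statement is the Claim_ definition above) =====
theorem merge_changes_spec : Claim_equal_merge_changes := by
  intro changes _
  unfold Spec_merge_changes merge_changes merge_changes_alt
  rw [foldl_aStep_split]
  simp [foldl_aAddUpd_eq_bAgg, foldl_aRmUpd_eq_bAgg]
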